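-- pv_equiv track=rewrite | github.com/millotp/adventofcode2023 | python/day13.py | has_sym
-- ===== SOURCE A (Python) =====
-- def has_sym(p):
--   for i in range(len(p)-1):
--     if p[i] == p[i+1]:
--       has_sy = True
--       # expand
--       for j in range(len(p)):
--         if i-j<0 or i+1+j>=len(p):
--           break
--         if not p[i-j] == p[i+1+j]:
--           has_sy = False
--       if has_sy:
--         return i+1
--   return 0
-- ===== SOURCE B (Python) =====
-- def has_sym(p):
--   n = len(p)
--   for i in range(1, n):
--     k = min(i, n - i)
--     if p[i-k:i] == p[i:i+k][::-1]:
--       return i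
--   return 0
-- ===== Notes on version B (the rewrite author's own statement) =====
-- stated objective: alternative
-- what changed: A expands around each equal adjacent pair with a flag-driven inner index loop that keeps scanning even after a mismatch; B instead, for each split position, compares the mirrored prefix block against the reversed suffix block as whole slices, with no flag and no expansion loop.
import Mathlib
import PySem

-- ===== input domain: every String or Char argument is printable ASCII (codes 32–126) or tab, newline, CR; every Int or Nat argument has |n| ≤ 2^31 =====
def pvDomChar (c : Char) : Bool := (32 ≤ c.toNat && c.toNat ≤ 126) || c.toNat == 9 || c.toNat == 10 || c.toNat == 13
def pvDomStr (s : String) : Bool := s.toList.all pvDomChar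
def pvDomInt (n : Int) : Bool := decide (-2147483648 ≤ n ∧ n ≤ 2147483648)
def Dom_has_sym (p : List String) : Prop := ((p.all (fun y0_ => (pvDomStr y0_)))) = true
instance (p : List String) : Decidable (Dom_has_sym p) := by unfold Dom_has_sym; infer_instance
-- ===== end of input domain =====

-- B replaces A's flag-driven expansion loop by whole-slice comparison of the mirrored blocks (alternative decomposition, same cost).

-- ===== PORT A =====
-- inner 'for j in range(len(p))' loop with its break and the has_sy flag
def hasSymInner (p : List String) (i : Int) : List Int → Bool → Bool
  | [], has_sy => has_sy
  | j :: js, has_sy =>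
    if i - j < 0 ∨ i + 1 + j ≥ (p.length : Int) then has_sy   -- break
    else if ¬ (PySem.List.pyGet? p (i - j) = PySem.List.pyGet? p (i + 1 + j)) then
      hasSymInner p i js false
    else
      hasSymInner p i js has_sy

-- outer 'for i in range(len(p)-1)' loop with its early returns
def hasSymOuter (p : List String) : List Int → Int
  | [] => 0
  | i :: is =>
    if PySem.List.pyGet? p i = PySem.List.pyGet? p (i + 1) then
      if hasSymInner p i (PySem.List.pyRange 0 (p.length : Int) 1) true then i + 1
      else hasSymOuter p is
    else hasSymOuter p is

def has_sym (p : List String) : Int :=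
  hasSymOuter p (PySem.List.pyRange 0 ((p.length : Int) - 1) 1)

-- ===== PORT B =====
-- 'for i in range(1, n)' loop; p[i:i+k][::-1] is reverse (PySem.List.slice?_none_none_neg_one)
def hasSymAltLoop (p : List String) : List Int → Int
  | [] => 0
  | i :: is =>
    let k := min i ((p.length : Int) - i)
    if PySem.List.slice p (some (i - k)) (some i)
        = (PySem.List.slice p (some i) (some (i + k))).reverse then i
    else hasSymAltLoop p is

def has_sym_alt (p : List String) : Int :=
  hasSymAltLoop p (PySem.List.pyRange 1 (p.length : Int) 1)

-- ===== PRECONDITION & SPEC =====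
def Spec_has_sym (p : List String) (out : Int) : Prop := out = has_sym_alt p
instance (p : List String) (out : Int) : Decidable (Spec_has_sym p out) := by unfold Spec_has_sym; infer_instance

-- ===== CLAIM (what is proved, stated in full; the proofs are below) =====
def Claim_equal_has_sym : Prop := ∀ (p : List String), Dom_has_sym p → Spec_has_sym p (has_sym p)

-- ===== LEMMAS AND PROOFS =====

-- A's inner loop computes: acc AND "all mirror pairs from offset a up to k match", k = min (i+1) (n-(i+1)).
lemma inner_char (p : List String) (i a n : Nat) (hn : n = p.length)
    (hi : i + 1 < n) (ha : a ≤ min (i+1) (n-(i+1))) (acc : Bool) :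
    hasSymInner p (i : Int) (PySem.List.pyRange (a : Int) (n : Int) 1) acc
      = (acc && (List.range' a (min (i+1) (n-(i+1)) - a)).all
          (fun j => p[i - j]? == p[i + 1 + j]?)) := by
  induction h : (min (i+1) (n-(i+1)) - a) generalizing a acc with
  | zero =>
    have han : (a : Int) < (n : Int) := by omega
    rw [PySem.List.pyRange_one_cons han]
    have hbrk : ((i:Int) - (a:Int) < 0 ∨ (i:Int) + 1 + (a:Int) ≥ ((p.length : Nat) : Int)) := by
      rw [← hn]; omega
    simp only [hasSymInner, if_pos hbrk]
    simp
  | succ d ih =>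
    have hak : a < min (i+1) (n-(i+1)) := by omega
    have han : (a : Int) < (n : Int) := by omega
    rw [PySem.List.pyRange_one_cons han]
    have hbrk : ¬((i:Int) - (a:Int) < 0 ∨ (i:Int) + 1 + (a:Int) ≥ ((p.length : Nat) : Int)) := by
      rw [← hn]; omega
    simp only [hasSymInner, if_neg hbrk]
    rw [show (i:Int) - (a:Int) = ((i - a : Nat) : Int) from by omega,
        show (i:Int) + 1 + (a:Int) = ((i + 1 + a : Nat) : Int) from by push_cast; ring,
        PySem.List.pyGet?_natCast, PySem.List.pyGet?_natCast,
        show ((a:Int) + 1) = ((a + 1 : Nat) : Int) from by push_cast; ring,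
        List.range'_succ, List.all_cons]
    have ih' := fun acc' => ih (a+1) (by omega) acc' (by omega)
    by_cases hm : p[i - a]? = p[i + 1 + a]?
    · rw [if_neg (by simp [hm]), ih' acc]
      simp [hm]
    · rw [if_pos (by simp [hm]), ih' false]
      simp [hm]

-- B's slice comparison holds iff all mirror pairs match.
lemma slice_char (p : List String) (i' kN : Nat) (h1 : kN ≤ i') (h2 : i' + kN ≤ p.length) :
    ((p.drop (i' - kN)).take kN = ((p.drop i').take kN).reverse)
      ↔ (∀ j < kN, p[i' - 1 - j]? = p[i' + j]?) := by
  have hL : ((p.drop i').take kN).length = kN := by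
    simp [List.length_take, List.length_drop]; omega
  constructor
  · intro he j hj
    have hcj := congrArg (fun l => l[kN - 1 - j]?) he
    simp only at hcj
    rw [List.getElem?_take_of_lt (by omega), List.getElem?_drop,
        show (i' - kN) + (kN - 1 - j) = i' - 1 - j from by omega,
        List.getElem?_reverse (by omega),
        hL, show kN - 1 - (kN - 1 - j) = j from by omega,
        List.getElem?_take_of_lt (by omega), List.getElem?_drop] at hcj
    exact hcj
  · intro hall
    apply List.ext_getElem?
    intro m
    by_cases hm : m < kN
    · rw [List.getElem?_take_of_lt (by omega), List.getElem?_drop,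
          List.getElem?_reverse (by omega), hL,
          List.getElem?_take_of_lt (by omega), List.getElem?_drop]
      have := hall (kN - 1 - m) (by omega)
      rw [show i' - 1 - (kN - 1 - m) = (i' - kN) + m from by omega] at this
      rw [this]
    · rw [List.getElem?_eq_none (by simp [List.length_take, List.length_drop]; omega),
          List.getElem?_eq_none (by simp [hL]; omega)]

-- the two loops agree from any starting index
lemma loop_eq (p : List String) (n a : Nat) (hn : n = p.length) :
    hasSymOuter p (PySem.List.pyRange (a : Int) ((n : Int) - 1) 1)
      = hasSymAltLoop p (PySem.List.pyRange ((a : Int) + 1) (n : Int) 1) := by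
  subst hn
  induction h : p.length - a generalizing a with
  | zero =>
    rw [PySem.List.pyRange_one_eq_nil (by omega), PySem.List.pyRange_one_eq_nil (by omega)]
    rfl
  | succ d ih =>
    by_cases hlt : a + 1 < p.length
    · set kN := min (a+1) (p.length-(a+1)) with hkN
      have hk1 : 1 ≤ kN := by omega
      have hka : kN ≤ a + 1 := by omega
      have hkn : a + 1 + kN ≤ p.length := by omega
      have hle : a + 1 ≤ p.length := by omega
      rw [PySem.List.pyRange_one_cons (show (a:Int) < (p.length:Int) - 1 from by omega),
          PySem.List.pyRange_one_cons (show (a:Int) + 1 < (p.length:Int) from by omega)]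
      have hin := inner_char p a 0 p.length rfl (by omega) (by omega) true
      simp only [Nat.cast_zero, Nat.sub_zero, Bool.true_and] at hin
      rw [← hkN] at hin
      have hbridge : ((List.range' 0 kN).all (fun j => p[a - j]? == p[a + 1 + j]?) = true)
          ↔ (∀ j < kN, p[(a+1) - 1 - j]? = p[(a+1) + j]?) := by
        simp only [List.all_eq_true, List.mem_range'_1, beq_iff_eq]
        constructor
        · intro hh j hj
          have := hh j ⟨Nat.zero_le _, by omega⟩
          simpa [show a + 1 - 1 - j = a - j from by omega] using this
        · intro hh j hj
          have := hh j (by omega)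
          simpa [show a + 1 - 1 - j = a - j from by omega] using this
      -- B's head condition, rewritten to drop/take form
      have hkcast : min ((a:Int)+1) ((p.length:Int) - ((a:Int)+1)) = ((kN : Nat) : Int) := by
        rw [hkN, Nat.cast_min, Nat.cast_sub hle]
        push_cast
        ring_nf
      have hslice :
          (PySem.List.slice p (some (((a:Int)+1) - min ((a:Int)+1) ((p.length:Int) - ((a:Int)+1))))
              (some ((a:Int)+1))
            = (PySem.List.slice p (some ((a:Int)+1))
                (some (((a:Int)+1) + min ((a:Int)+1) ((p.length:Int) - ((a:Int)+1))))).reverse)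
          ↔ (∀ j < kN, p[(a+1) - 1 - j]? = p[(a+1) + j]?) := by
        rw [hkcast,
            show ((a:Int)+1) - ((kN:Nat):Int) = ((a + 1 - kN : Nat) : Int) from by omega,
            show ((a:Int)+1) = ((a + 1 : Nat) : Int) from by push_cast; ring]
        rw [show (((a+1:Nat):Int)) + ((kN:Nat):Int) = ((a + 1 + kN : Nat) : Int) from by push_cast; ring,
            PySem.List.slice_natCast, PySem.List.slice_natCast,
            show (a + 1) - (a + 1 - kN) = kN from by omega,
            show (a + 1 + kN) - (a + 1) = kN from by omega]
        exact slice_char p (a+1) kN hka hkn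
      by_cases hall : (List.range' 0 kN).all (fun j => p[a - j]? == p[a + 1 + j]?) = true
      · -- symmetry found at this split: both return a+1
        have hguard : PySem.List.pyGet? p (a:Int) = PySem.List.pyGet? p ((a:Int) + 1) := by
          have h0 := (hbridge.mp hall) 0 (by omega)
          rw [show ((a:Int) + 1) = ((a + 1 : Nat) : Int) from by push_cast; ring,
              PySem.List.pyGet?_natCast, PySem.List.pyGet?_natCast]
          simpa using h0
        simp only [hasSymOuter, hasSymAltLoop, if_pos hguard]
        rw [hin, if_pos hall, if_pos (hslice.mpr (hbridge.mp hall))]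
      · -- no symmetry here: both loops continue; apply the induction hypothesis
        have hrecB : ¬ (PySem.List.slice p (some (((a:Int)+1) - min ((a:Int)+1) ((p.length:Int) - ((a:Int)+1))))
              (some ((a:Int)+1))
            = (PySem.List.slice p (some ((a:Int)+1))
                (some (((a:Int)+1) + min ((a:Int)+1) ((p.length:Int) - ((a:Int)+1))))).reverse) := by
          intro hc
          exact hall (hbridge.mpr (hslice.mp hc))
        have hrec := ih (a+1) (by omega)
        simp only [hasSymOuter, hasSymAltLoop]
        rw [if_neg hrecB]
        by_cases hguard : PySem.List.pyGet? p (a:Int) = PySem.List.pyGet? p ((a:Int) + 1)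
        · rw [if_pos hguard, hin, if_neg hall]
          simpa [add_assoc] using hrec
        · rw [if_neg hguard]
          simpa [add_assoc] using hrec
    · rw [PySem.List.pyRange_one_eq_nil (by omega), PySem.List.pyRange_one_eq_nil (by omega)]
      rfl

-- ===== VERDICT (by name: the statement is the Claim_ definition above) =====
theorem has_sym_spec : Claim_equal_has_sym := by
  intro p _
  unfold Spec_has_sym has_sym has_sym_alt
  have h := loop_eq p p.length 0 rfl
  simpa using h
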